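-- pv_equiv track=rewrite | github.com/skhademolhosseini/Library-Simulator | books.py | get_all_valid_location
-- ===== SOURCE A (Python) =====
-- def get_all_valid_location(collection_of_books: tuple) -> list:
--     """
--     Find all valid location where a book can be.
--
--     :param collection_of_books: A tuple containing all books as dictionary.
--     :precondition: Value passed to the function as parameter must be the right type and format.
--     :postcondition: Will create a set of all possible places where a book can be placed.
--     :postcondition: Will change the set to a list in order to sort the possible locations.
--     :return: A list containing all valid locations.
--
--      >>> book_collection = turn_str_into_collection(load_text_file("Testing_book.txt"))
--      >>> get_all_valid_location(book_collection)
--      ['6', '10', '12', '16', '17', '31', '34']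
--
--     """
--     possible_locations = set()
--     for book in collection_of_books:
--         possible_locations.add(book["Shelf"])
--
--     number_list = []
--     alpha_list = []
--     for shelf in possible_locations:
--         if shelf.isnumeric():
--             number_list.append(int(shelf))
--
--         if shelf.isalpha():
--             alpha_list.append(shelf)
--
--     sorted_possible_locations = []
--     for number in sorted(number_list):
--         sorted_possible_locations.append(str(number))
--     for alpha in sorted(alpha_list):
--         sorted_possible_locations.append(alpha)
--
--     return sorted_possible_locations
-- ===== SOURCE B (Python) =====
-- def get_all_valid_location(collection_of_books: tuple) -> list:
--     """One keyed sort over the deduped shelves instead of two classification lists and two sorts."""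
--     shelves = set()
--     for book in collection_of_books:
--         shelves.add(book["Shelf"])
--     keyed = [(0, int(s), "") if s.isnumeric() else (1, 0, s)
--              for s in shelves if s.isnumeric() or s.isalpha()]
--     return [str(n) if tag == 0 else s for tag, n, s in sorted(keyed)]
-- ===== Notes on version B (the rewrite author's own statement) =====
-- stated objective: idiomatic
-- what changed: Replaces the two classification lists and two separate sorts by one comprehension building composite sort keys ((0,int(s),'') for numeric, (1,0,s) for alphabetic) and a single sorted call that yields the final order directly.
import Mathlib
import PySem

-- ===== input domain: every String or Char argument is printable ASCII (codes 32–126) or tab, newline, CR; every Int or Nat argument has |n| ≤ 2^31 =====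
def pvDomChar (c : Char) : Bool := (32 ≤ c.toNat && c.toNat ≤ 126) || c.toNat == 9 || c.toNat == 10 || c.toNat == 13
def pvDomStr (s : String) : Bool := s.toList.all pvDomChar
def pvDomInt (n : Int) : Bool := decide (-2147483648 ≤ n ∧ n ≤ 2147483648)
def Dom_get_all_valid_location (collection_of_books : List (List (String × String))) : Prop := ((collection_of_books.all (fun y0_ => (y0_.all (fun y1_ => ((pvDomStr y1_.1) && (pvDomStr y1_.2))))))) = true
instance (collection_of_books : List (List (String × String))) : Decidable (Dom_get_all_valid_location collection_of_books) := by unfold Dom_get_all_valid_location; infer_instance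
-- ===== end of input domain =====

-- B replaces A's two classification lists and two sorts by one keyed sort over the deduped
-- shelves (objective: idiomatic). Python's isnumeric() is ported as strIsdigit: identical on
-- the printable-ASCII domain. A's per-element loops over the set are order-independent
-- (everything is sorted, and elements tying under the sort key produce equal output strings),
-- so consuming the PySem.Set's list order is exact here.

-- ===== PORT A =====
def get_all_valid_location (collection_of_books : List (List (String × String))) : List String :=
  -- possible_locations = set(); for book: possible_locations.add(book["Shelf"])
  -- book["Shelf"] raises KeyError when absent: total form getD, used only under Pre_
  let possible_locations : PySem.Set String :=
    collection_of_books.foldl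
      (fun s book => PySem.Set.add s (PySem.Dict.getD (PySem.Dict.mk book) "Shelf" "")) PySem.Set.empty
  -- for shelf: if isnumeric append int(shelf); if isalpha append shelf
  -- (int(shelf) with shelf all ASCII digits never raises: ofStr? is some; getD 0 is its total form)
  let lists : List Int × List String :=
    possible_locations.foldl
      (fun (p : List Int × List String) shelf =>
        let p1 := if PySem.Str.strIsdigit shelf then (p.1 ++ [(PySem.Int.ofStr? shelf).getD 0], p.2) else p
        if PySem.Str.strIsalpha shelf then (p1.1, p1.2 ++ [shelf]) else p1)
      ([], [])
  let s1 := (PySem.List.sorted lists.1 (fun x => x) false).foldl (fun acc number => acc ++ [PySem.Int.toStr number]) []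
  (PySem.List.sorted lists.2 (fun x => x) false).foldl (fun acc alpha => acc ++ [alpha]) s1

-- ===== PORT B =====
-- composite sort key: (0, int(s), "") for numeric shelves, (1, 0, s) for alphabetic ones
def pvShelfKey (s : String) : Int × Int × String :=
  if PySem.Str.strIsdigit s then (0, (PySem.Int.ofStr? s).getD 0, "") else (1, 0, s)

-- Python's '<' on these 3-tuples: lexicographic comparison, written out componentwise
def pvKeyLt (a b : Int × Int × String) : Bool :=
  a.1 < b.1 || (a.1 == b.1 && (a.2.1 < b.2.1 || (a.2.1 == b.2.1 && a.2.2 < b.2.2)))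

def pvEmit (k : Int × Int × String) : String :=
  if k.1 = 0 then PySem.Int.toStr k.2.1 else k.2.2

def get_all_valid_location_alt (collection_of_books : List (List (String × String))) : List String :=
  let shelves : PySem.Set String :=
    collection_of_books.foldl
      (fun s book => PySem.Set.add s (PySem.Dict.getD (PySem.Dict.mk book) "Shelf" "")) PySem.Set.empty
  let keyed := (shelves.filter (fun s => PySem.Str.strIsdigit s || PySem.Str.strIsalpha s)).map pvShelfKey
  -- sorted(keyed): PySem.List.sorted IS this insertBy fold (PySem.List.sorted_eq_foldl_insertBy, rfl);
  -- it is written out with the explicit tuple comparator pvKeyLt because the Lex instances do not compile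
  (keyed.foldl (fun acc x => PySem.List.insertBy pvKeyLt x acc) []).map pvEmit

-- ===== PRECONDITION & SPEC =====
-- Pre_ excludes exactly the inputs with a book lacking the "Shelf" key, on which A (and B) raise KeyError.
def Pre_get_all_valid_location (collection_of_books : List (List (String × String))) : Prop :=
  ∀ book ∈ collection_of_books, "Shelf" ∈ book.map Prod.fst
instance (collection_of_books : List (List (String × String))) : Decidable (Pre_get_all_valid_location collection_of_books) := by unfold Pre_get_all_valid_location; infer_instance

def pvWitness_get_all_valid_location : (List (List (String × String))) :=
  [[("Shelf", "7")], [("Shelf", "ab"), ("Author", "x")], [("Shelf", "07")]]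

def Spec_get_all_valid_location (collection_of_books : List (List (String × String))) (out : List String) : Prop := out = get_all_valid_location_alt collection_of_books
instance (collection_of_books : List (List (String × String))) (out : List String) : Decidable (Spec_get_all_valid_location collection_of_books out) := by unfold Spec_get_all_valid_location; infer_instance

-- ===== CLAIM (what is proved, stated in full; the proofs are below) =====
def Claim_equal_get_all_valid_location : Prop := ∀ (collection_of_books : List (List (String × String))), Dom_get_all_valid_location collection_of_books → Pre_get_all_valid_location collection_of_books → Spec_get_all_valid_location collection_of_books (get_all_valid_location collection_of_books)

-- ===== LEMMAS AND PROOFS =====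

-- proof-side abbreviations for the two key shapes
def pvKnum (n : Int) : Int × Int × String := (0, n, "")
def pvKalph (s : String) : Int × Int × String := (1, 0, s)

-- the insertion fold of port B is PySem's sorted under the lexicographic order
lemma pv_foldl_insertBy_eq_sorted (xs : List (Int × Int × String)) :
    xs.foldl (fun acc x => PySem.List.insertBy pvKeyLt x acc) []
      = PySem.List.sorted (α := Int ×ₗ Int ×ₗ String) xs (fun x => x) false := by
  rw [PySem.List.sorted_eq_foldl_insertBy]
  congr 1
  funext acc x
  congr 1
  funext a b
  apply (Bool.eq_iff_iff.mpr _).symm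
  rw [decide_eq_true_eq]
  change (toLex ((a.1, toLex (a.2.1, a.2.2))) < toLex ((b.1, toLex (b.2.1, b.2.2)))) ↔ _
  rw [Prod.Lex.toLex_lt_toLex, Prod.Lex.toLex_lt_toLex]
  simp only [pvKeyLt, Bool.or_eq_true, Bool.and_eq_true, decide_eq_true_eq, beq_iff_eq]

-- an alphabetic character is not a digit
lemma pv_char_alpha_not_digit (c : Char) (h : PySem.Chars.isalpha c = true) :
    PySem.Chars.isdigit c = false := by
  simp only [PySem.Chars.isalpha, PySem.Chars.isupper, PySem.Chars.islower, PySem.Chars.isdigit,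
    Bool.or_eq_true, Bool.and_eq_true, decide_eq_true_eq, Char.le_def, UInt32.le_iff_toNat_le] at *
  simp only [Bool.and_eq_false_iff, decide_eq_false_iff_not, not_le]
  have e1 : 'A'.val.toNat = 65 := rfl
  have e2 : 'Z'.val.toNat = 90 := rfl
  have e3 : 'a'.val.toNat = 97 := rfl
  have e4 : 'z'.val.toNat = 122 := rfl
  have e5 : '0'.val.toNat = 48 := rfl
  have e6 : '9'.val.toNat = 57 := rfl
  omega

-- an alphabetic string is not a digit string
lemma pv_alpha_not_digit (s : String) (h : PySem.Str.strIsalpha s = true) :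
    PySem.Str.strIsdigit s = false := by
  rw [PySem.Str.strIsalpha_eq] at h
  rw [PySem.Str.strIsdigit_eq]
  rcases hl : s.toList with _ | ⟨c, cs⟩
  · simp [PySem.Chars.strIsdigit]
  · rw [hl] at h
    simp only [PySem.Chars.strIsalpha, Bool.and_eq_true, List.all_eq_true] at h
    have hc := h.2 c List.mem_cons_self
    simp [PySem.Chars.strIsdigit, pv_char_alpha_not_digit c hc]

-- A's classification loop computes the two filtered lists
lemma pv_pairfold (S : List String) (acc : List Int × List String) :
    S.foldl
      (fun (p : List Int × List String) shelf =>
        let p1 := if PySem.Str.strIsdigit shelf then (p.1 ++ [(PySem.Int.ofStr? shelf).getD 0], p.2) else p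
        if PySem.Str.strIsalpha shelf then (p1.1, p1.2 ++ [shelf]) else p1) acc
    = (acc.1 ++ (S.filter PySem.Str.strIsdigit).map (fun s => (PySem.Int.ofStr? s).getD 0),
       acc.2 ++ S.filter PySem.Str.strIsalpha) := by
  induction S generalizing acc with
  | nil => simp
  | cons x S ih =>
    simp only [List.foldl_cons, List.filter_cons, ih]
    cases hd : PySem.Str.strIsdigit x <;> cases ha : PySem.Str.strIsalpha x <;> simp

lemma pv_emit_knum (n : Int) : pvEmit (pvKnum n) = PySem.Int.toStr n := by
  simp [pvEmit, pvKnum]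

lemma pv_emit_kalph (s : String) : pvEmit (pvKalph s) = s := by
  simp [pvEmit, pvKalph]

-- the single keyed sort of B is the concatenation of A's two sorts
lemma pv_sorted_keyed (S : List String) :
    PySem.List.sorted (α := Int ×ₗ Int ×ₗ String)
      (((S.filter (fun s => PySem.Str.strIsdigit s || PySem.Str.strIsalpha s)).map pvShelfKey : List (Int × Int × String))) (fun x => x) false
    = (PySem.List.sorted ((S.filter PySem.Str.strIsdigit).map (fun s => (PySem.Int.ofStr? s).getD 0)) (fun x => x) false).map pvKnum
      ++ (PySem.List.sorted (S.filter PySem.Str.strIsalpha) (fun x => x) false).map pvKalph := by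
  have hperm2 : ((S.filter PySem.Str.strIsdigit) ++ (S.filter PySem.Str.strIsalpha)).Perm
      (S.filter (fun s => PySem.Str.strIsdigit s || PySem.Str.strIsalpha s)) := by
    have h0 := List.filter_append_perm PySem.Str.strIsdigit
        (S.filter (fun s => PySem.Str.strIsdigit s || PySem.Str.strIsalpha s))
    rw [List.filter_filter, List.filter_filter] at h0
    have e1 : S.filter (fun a => PySem.Str.strIsdigit a
          && (PySem.Str.strIsdigit a || PySem.Str.strIsalpha a)) = S.filter PySem.Str.strIsdigit :=
      List.filter_congr (fun x _ => by
        cases PySem.Str.strIsdigit x <;> cases PySem.Str.strIsalpha x <;> rfl)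
    have e2 : S.filter (fun a => (!PySem.Str.strIsdigit a)
          && (PySem.Str.strIsdigit a || PySem.Str.strIsalpha a)) = S.filter PySem.Str.strIsalpha :=
      List.filter_congr (fun x _ => by
        cases hd2 : PySem.Str.strIsdigit x
        · simp
        · cases ha : PySem.Str.strIsalpha x
          · simp
          · rw [pv_alpha_not_digit x ha] at hd2
            exact Bool.noConfusion hd2)
    rwa [e1, e2] at h0
  have hmap1 : (S.filter PySem.Str.strIsdigit).map pvShelfKey
      = ((S.filter PySem.Str.strIsdigit).map (fun s => (PySem.Int.ofStr? s).getD 0)).map pvKnum := by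
    rw [List.map_map]
    exact List.map_congr_left (fun x hx => by
      have hd := (List.mem_filter.mp hx).2
      rw [PySem.Str.strIsdigit_eq] at hd
      simp [pvShelfKey, pvKnum, hd])
  have hmap2 : (S.filter PySem.Str.strIsalpha).map pvShelfKey
      = (S.filter PySem.Str.strIsalpha).map pvKalph :=
    List.map_congr_left (fun x hx => by
      have ha := (List.mem_filter.mp hx).2
      have hd := pv_alpha_not_digit x ha
      rw [PySem.Str.strIsdigit_eq] at hd
      simp [pvShelfKey, pvKalph, hd])
  apply PySem.List.sorted_id_eq_of_perm_of_pairwise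
  · have hp := hperm2.map pvShelfKey
    rw [List.map_append] at hp
    refine List.Perm.trans (List.Perm.append
      (((PySem.List.sorted_perm _ _ _).map pvKnum))
      (((PySem.List.sorted_perm _ _ _).map pvKalph))) ?_
    rw [← hmap1, ← hmap2]
    exact hp
  · refine List.pairwise_append.mpr ⟨?_, ?_, ?_⟩
    · refine (PySem.List.sorted_pairwise _ _).map pvKnum (fun a b hab => ?_)
      rcases lt_or_eq_of_le hab with h' | h'
      · exact Prod.Lex.right _ (Prod.Lex.left _ _ h')
      · subst h'
        exact le_refl _
    · refine (PySem.List.sorted_pairwise _ _).map pvKalph (fun a b hab => ?_)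
      rcases lt_or_eq_of_le hab with h' | h'
      · exact Prod.Lex.right _ (Prod.Lex.right _ (le_of_lt h'))
      · subst h'
        exact le_refl _
    · rintro x hx y hy
      obtain ⟨n, _, rfl⟩ := List.mem_map.mp hx
      obtain ⟨s, _, rfl⟩ := List.mem_map.mp hy
      exact Prod.Lex.left _ _ (by norm_num : (0:Int) < 1)

-- ===== VERDICT (by name: the statement is the Claim_ definition above) =====
theorem get_all_valid_location_spec : Claim_equal_get_all_valid_location := by
  intro c _ _
  unfold Spec_get_all_valid_location get_all_valid_location get_all_valid_location_alt
  dsimp only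
  generalize (c.foldl
      (fun s book => PySem.Set.add s (PySem.Dict.getD (PySem.Dict.mk book) "Shelf" "")) PySem.Set.empty) = S
  rw [pv_pairfold]
  dsimp only
  simp only [PySem.List.foldl_append_singleton_eq_map, List.nil_append]
  rw [pv_foldl_insertBy_eq_sorted, pv_sorted_keyed]
  simp [List.map_map, Function.comp_def, pv_emit_knum, pv_emit_kalph]
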